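-- pv_equiv track=rewrite | github.com/TheTheoM/HybridIDPS | hybridLayer/hybridLayer.py | extract_ips
-- ===== SOURCE A (Python) =====
-- def extract_ips(results):
--     ip_dict = {}
--     for entry in results:
--         ip = entry['ip_address']
--         if ip not in ip_dict:
--             ip_dict[ip] = []
--         ip_dict[ip].append(entry)
--     return ip_dict
-- ===== SOURCE B (Python) =====
-- def extract_ips(results):
--     seen = []
--     for entry in results:
--         ip = entry['ip_address']
--         if ip not in seen:
--             seen.append(ip)
--     return {ip: [e for e in results if e['ip_address'] == ip] for ip in seen}
-- ===== Notes on version B (the rewrite author's own statement) =====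
-- stated objective: alternative
-- what changed: Replaces the single dict-building pass with a two-phase plan: first collect the distinct ips in first-appearance order, then build each group by filtering the input list, so no dict is mutated.
import Mathlib
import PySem

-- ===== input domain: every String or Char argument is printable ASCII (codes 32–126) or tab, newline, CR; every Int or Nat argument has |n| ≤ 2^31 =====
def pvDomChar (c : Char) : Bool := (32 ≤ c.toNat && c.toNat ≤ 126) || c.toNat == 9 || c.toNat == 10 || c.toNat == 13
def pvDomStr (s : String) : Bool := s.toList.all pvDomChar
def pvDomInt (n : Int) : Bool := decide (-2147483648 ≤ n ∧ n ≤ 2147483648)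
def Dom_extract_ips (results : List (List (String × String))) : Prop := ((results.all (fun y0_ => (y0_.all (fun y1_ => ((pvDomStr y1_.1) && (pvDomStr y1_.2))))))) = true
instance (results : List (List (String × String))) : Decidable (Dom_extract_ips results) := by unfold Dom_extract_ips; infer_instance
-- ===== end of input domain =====

-- B replaces the dict-mutating single pass by two phases (distinct ips in first-appearance
-- order, then one filter of the input per ip); an alternative decomposition, not faster.


-- ===== PORT A =====
-- entry['ip_address'] : first-match lookup in the association list; Pre_ guarantees the key
-- is present (Python raises KeyError otherwise), so the "" default is never consulted there.
def ipOf (entry : List (String × String)) : String :=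
  ((entry.find? (fun p => p.1 == "ip_address")).map Prod.snd).getD ""

def extract_ips (results : List (List (String × String))) : List (String × List (List (String × String))) :=
  (results.foldl
    (fun d entry =>
      let ip := ipOf entry
      let d' := if d.contains ip then d else d.insert ip ([] : List (List (String × String)))
      d'.modify ip [] (fun l => l ++ [entry]))
    PySem.Dict.empty).items

-- ===== PORT B =====
def extract_ips_alt (results : List (List (String × String))) : List (String × List (List (String × String))) :=
  let seen := results.foldl (fun s entry => PySem.Set.add s (ipOf entry)) ([] : List String)
  seen.map (fun ip => (ip, results.filter (fun e => ipOf e == ip)))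

-- ===== PRECONDITION & SPEC =====
-- Pre_ excludes exactly the inputs where some entry lacks the 'ip_address' key, on which
-- the Python A (and B) raise KeyError.
def Pre_extract_ips (results : List (List (String × String))) : Prop :=
  (results.all (fun e => e.any (fun p => p.1 == "ip_address"))) = true
instance (results : List (List (String × String))) : Decidable (Pre_extract_ips results) := by unfold Pre_extract_ips; infer_instance

def pvWitness_extract_ips : (List (List (String × String))) :=
  [[("ip_address", "1.2.3.4"), ("kind", "scan")], [("ip_address", "1.2.3.4")], [("ip_address", "8.8.8.8")]]

def Spec_extract_ips (results : List (List (String × String))) (out : List (String × List (List (String × String)))) : Prop := out = extract_ips_alt results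
instance (results : List (List (String × String))) (out : List (String × List (List (String × String)))) : Decidable (Spec_extract_ips results out) := by unfold Spec_extract_ips; infer_instance

-- ===== CLAIM (what is proved, stated in full; the proofs are below) =====
def Claim_equal_extract_ips : Prop := ∀ (results : List (List (String × String))), Dom_extract_ips results → Pre_extract_ips results → Spec_extract_ips results (extract_ips results)

-- ===== LEMMAS AND PROOFS =====

-- A's loop body equals a single dict-modify (the insert-[] branch only pre-creates the key).
theorem step_eq_modify (d : PySem.Dict String (List (List (String × String))))
    (entry : List (String × String)) :
    (if d.contains (ipOf entry) then d else d.insert (ipOf entry) []).modify (ipOf entry) []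
        (fun l => l ++ [entry])
      = d.modify (ipOf entry) [] (fun l => l ++ [entry]) := by
  by_cases h : d.contains (ipOf entry)
  · simp [h]
  · simp [h, PySem.Dict.modify, PySem.Dict.getD_insert_self, PySem.Dict.insert_insert_self,
      PySem.Dict.getD_of_not_contains _ _ (Bool.eq_false_iff.mpr h)]

-- ===== VERDICT (by name: the statement is the Claim_ definition above) =====
theorem extract_ips_spec : Claim_equal_extract_ips := by
  intro results _ _
  unfold Spec_extract_ips extract_ips extract_ips_alt
  -- collapse A's loop body
  have hbody : results.foldl
      (fun d entry =>
        let ip := ipOf entry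
        let d' := if d.contains ip then d else d.insert ip ([] : List (List (String × String)))
        d'.modify ip [] (fun l => l ++ [entry]))
      PySem.Dict.empty
      = (results.map (fun e => (ipOf e, e))).foldl
          (fun d p => d.modify p.1 [] (fun l => l ++ [p.2])) PySem.Dict.empty := by
    rw [List.foldl_map]
    exact PySem.List.foldl_congr_mem _ _ _ _ (fun d e _ => step_eq_modify d e)
  rw [hbody]
  set l := results.map (fun e => (ipOf e, e)) with hl
  have hnd : ((l.foldl (fun d p => d.modify p.1 [] (fun v => v ++ [p.2])) PySem.Dict.empty).keys).Nodup := by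
    exact PySem.Dict.nodup_keys_foldl_modify_key l Prod.fst [] _ _ PySem.Dict.nodup_keys_empty
  rw [PySem.Dict.items_eq_map_keys _ hnd []]
  have hkeys : (l.foldl (fun d p => d.modify p.1 [] (fun v => v ++ [p.2])) PySem.Dict.empty).keys
      = results.foldl (fun s entry => PySem.Set.add s (ipOf entry)) ([] : List String) := by
    rw [PySem.Dict.keys_foldl_modify_key]
    rw [← PySem.Set.update_map_eq_foldl_add]
    simp [hl, List.map_map, PySem.Dict.keys_empty, PySem.Set.update, Function.comp_def]
  rw [hkeys]
  apply List.map_congr_left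
  intro ip _
  refine Prod.ext rfl ?_
  show (l.foldl (fun d p => d.modify p.1 [] (fun v => v ++ [p.2])) PySem.Dict.empty).getD ip []
      = results.filter (fun e => ipOf e == ip)
  rw [PySem.Dict.getD_foldl_modify_append]
  simp [hl, List.filter_map, Function.comp_def]
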